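-- pv_equiv track=rewrite | github.com/RagnarB83/ash | ash/modules/module_coords.py | update_atom_indices_upon_deletion
-- ===== SOURCE A (Python) =====
-- def update_atom_indices_upon_deletion(atomlist, dellist):
--     # Making sure dellist is sorted and determining highest and lowest value
--     dellist.sort(reverse=True)
--     lowest_atomindex = dellist[-1]
--     highest_atomindex = dellist[0]
--     atomlist_new = []
--     for q in atomlist:
--         if q in dellist:
--             # These QM atoms were deleted and do not survive
--             pass
--         elif q < lowest_atomindex:
--             # These QM atoms have lower value than loweste deleted atomindex and survive
--             atomlist_new.append(q)
--         elif q > highest_atomindex: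
--             # Shifting these indices by length of delatoms-list
--             shiftpar = len(dellist)
--             atomlist_new.append(q - shiftpar)
--         else:
--             # These atom indices are inbetween
--             # Shifting depending on how many delatoms indices come before
--             shiftpar = len([i for i in dellist if i < q])
--             atomlist_new.append(q - shiftpar)
--     return atomlist_new
-- ===== SOURCE B (Python) =====
-- def _bisect_left(a, x):
--     # standard binary search (= bisect.bisect_left)
--     lo, hi = 0, len(a)
--     while lo < hi:
--         mid = (lo + hi) // 2
--         if a[mid] < x:
--             lo = mid + 1
--         else:
--             hi = mid
--     return lo
--
--
-- def update_atom_indices_upon_deletion(atomlist, dellist):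
--     ds = sorted(dellist)
--     delset = set(ds)
--     return [q - _bisect_left(ds, q) for q in atomlist if q not in delset]
-- ===== Notes on version B (the rewrite author's own statement) =====
-- stated objective: faster
-- what changed: Replaces the per-element linear membership test and inner counting scan over dellist by one up-front sort, a hash set for membership and binary search (bisect_left) to count deletions below each index, removing all three branch cases.
import Mathlib
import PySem

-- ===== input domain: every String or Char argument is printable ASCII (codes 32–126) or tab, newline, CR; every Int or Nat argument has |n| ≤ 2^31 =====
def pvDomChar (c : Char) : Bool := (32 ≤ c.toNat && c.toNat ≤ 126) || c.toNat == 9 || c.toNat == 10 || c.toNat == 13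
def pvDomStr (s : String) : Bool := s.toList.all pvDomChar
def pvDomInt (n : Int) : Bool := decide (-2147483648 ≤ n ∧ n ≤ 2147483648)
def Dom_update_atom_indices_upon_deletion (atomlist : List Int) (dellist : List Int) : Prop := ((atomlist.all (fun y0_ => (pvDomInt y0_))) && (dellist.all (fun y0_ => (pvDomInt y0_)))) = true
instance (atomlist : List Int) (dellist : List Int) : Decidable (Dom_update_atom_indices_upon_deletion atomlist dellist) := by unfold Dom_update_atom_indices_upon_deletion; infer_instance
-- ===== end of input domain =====

-- B replaces the three-way branch + inner scan over dellist by sort + set membership + binary-search counting (asymptotically faster).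
-- Equivalence is about the RETURN value only: Python A sorts dellist in place (reverse), B leaves its arguments unmodified.

-- ===== PORT A =====
def update_atom_indices_upon_deletion (atomlist : List Int) (dellist : List Int) : List Int :=
  -- dellist.sort(reverse=True)
  let d := PySem.List.sorted dellist (fun x => x) true
  match PySem.List.pyGet? d (-1), PySem.List.pyGet? d 0 with
  | some lowest_atomindex, some highest_atomindex =>
      atomlist.foldl (fun acc q =>
        if d.contains q then acc
        else if q < lowest_atomindex then acc ++ [q]
        else if highest_atomindex < q then acc ++ [q - (d.length : Int)]
        else acc ++ [q - ((d.filter (fun i => decide (i < q))).length : Int)]) []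
  | _, _ => []   -- dellist = []: Python raises IndexError; excluded by Pre_

-- ===== PORT B =====
-- Source B's hand-written _bisect_left is verbatim bisect.bisect_left; PySem.List.bisectLeft is its step-for-step binary-search loop.
def update_atom_indices_upon_deletion_alt (atomlist : List Int) (dellist : List Int) : List Int :=
  let ds := PySem.List.sorted dellist (fun x => x) false
  let delset := PySem.Set.ofList ds
  atomlist.foldl (fun out q =>
    if delset.contains q then out
    else out ++ [q - (PySem.List.bisectLeft ds q : Int)]) []

-- ===== PRECONDITION & SPEC =====
-- Pre_ excludes only an empty dellist, on which A raises IndexError at dellist[-1].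
def Pre_update_atom_indices_upon_deletion (atomlist : List Int) (dellist : List Int) : Prop := dellist ≠ []
instance (atomlist : List Int) (dellist : List Int) : Decidable (Pre_update_atom_indices_upon_deletion atomlist dellist) := by unfold Pre_update_atom_indices_upon_deletion; infer_instance
def pvWitness_update_atom_indices_upon_deletion : List Int × List Int := ([0, 5, 9, 2], [2, 3])


def Spec_update_atom_indices_upon_deletion (atomlist : List Int) (dellist : List Int) (out : List Int) : Prop := out = update_atom_indices_upon_deletion_alt atomlist dellist
instance (atomlist : List Int) (dellist : List Int) (out : List Int) : Decidable (Spec_update_atom_indices_upon_deletion atomlist dellist out) := by unfold Spec_update_atom_indices_upon_deletion; infer_instance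

-- ===== CLAIM (what is proved, stated in full; the proofs are below) =====
def Claim_equal_update_atom_indices_upon_deletion : Prop := ∀ (atomlist : List Int) (dellist : List Int), Dom_update_atom_indices_upon_deletion atomlist dellist → Pre_update_atom_indices_upon_deletion atomlist dellist → Spec_update_atom_indices_upon_deletion atomlist dellist (update_atom_indices_upon_deletion atomlist dellist)

-- ===== LEMMAS AND PROOFS =====

-- bisect_left on an ascending list counts the elements strictly below x
theorem bisectLeft_eq_countP (ds : List Int) (x : Int) (hs : ds.Pairwise (· ≤ ·)) :
    (PySem.List.bisectLeft ds x : Nat) = ds.countP (fun i => decide (i < x)) := by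
  obtain ⟨hle, h1, h2⟩ := PySem.List.bisectLeft_spec ds x hs
  set r := PySem.List.bisectLeft ds x with hr
  have hsplit : ds.countP (fun i => decide (i < x))
      = (ds.take r).countP (fun i => decide (i < x)) + (ds.drop r).countP (fun i => decide (i < x)) := by
    rw [← List.countP_append, List.take_append_drop]
  have ht : (ds.take r).countP (fun i => decide (i < x)) = r := by
    have heq : (ds.take r).countP (fun i => decide (i < x)) = (ds.take r).length := by
      rw [List.countP_eq_length]
      intro a ha
      obtain ⟨j, hj, hja⟩ := List.mem_take_iff_getElem.1 ha
      have hjr : j < r := Nat.lt_of_lt_of_le hj (min_le_left _ _)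
      have hjl : j < ds.length := Nat.lt_of_lt_of_le hj (min_le_right _ _)
      simpa [hja] using h1 j hjl hjr
    rw [heq, List.length_take, Nat.min_eq_left hle]
  have hd : (ds.drop r).countP (fun i => decide (i < x)) = 0 := by
    rw [List.countP_eq_zero]
    intro a ha
    obtain ⟨j, hj, hja⟩ := List.mem_iff_getElem.1 ha
    have hjl : r + j < ds.length := by
      simpa [List.length_drop] using Nat.add_lt_of_lt_sub' (by simpa [List.length_drop] using hj)
    have := h2 (r + j) hjl (Nat.le_add_right _ _)
    simp only [List.getElem_drop] at hja
    simp [← hja]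
    omega
  omega

-- the last element of a descending list is ≤ every member
theorem getLast_le_of_pairwise_ge (l : List Int) (hne : l ≠ []) (hp : l.Pairwise (fun a b => b ≤ a)) :
    ∀ x ∈ l, l.getLast hne ≤ x := by
  induction l with
  | nil => simp at hne
  | cons a t ih =>
    intro x hx
    cases t with
    | nil => simp at hx; simp [hx, List.getLast]
    | cons b t' =>
      have hp' := (List.pairwise_cons.1 hp)
      have hb : (b :: t' : List Int) ≠ [] := by simp
      have hlast : (a :: b :: t').getLast hne = (b :: t').getLast hb := by
        simp [List.getLast]
      rw [hlast]
      rcases List.mem_cons.1 hx with h | h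
      · rw [h]
        exact le_trans (ih hb hp'.2 _ (List.getLast_mem hb)) (hp'.1 _ (List.getLast_mem hb))
      · exact ih hb hp'.2 x h

-- Python l[-1] on a nonempty list is its last element
theorem pyGet_neg_one (l : List Int) (hne : l ≠ []) :
    PySem.List.pyGet? l (-1) = some (l.getLast hne) := by
  have hlen : 0 < l.length := List.length_pos_iff.2 hne
  have hidx : PySem.List.pyIdx? l.length (-1) = some (l.length - 1) := by
    simp [PySem.List.pyIdx?]
    omega
  simp [PySem.List.pyGet?, hidx, List.getElem?_eq_getElem (by omega : l.length - 1 < l.length),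
    List.getLast_eq_getElem]

-- ===== VERDICT (by name: the statement is the Claim_ definition above) =====
theorem update_atom_indices_upon_deletion_spec : Claim_equal_update_atom_indices_upon_deletion := by
  intro atomlist dellist _ hpre
  unfold Spec_update_atom_indices_upon_deletion
  unfold update_atom_indices_upon_deletion update_atom_indices_upon_deletion_alt
  dsimp only
  set d := PySem.List.sorted dellist (fun x => x) true with hd
  set ds := PySem.List.sorted dellist (fun x => x) false with hds
  have hdne : d ≠ [] := by
    rw [hd, Ne, PySem.List.sorted_eq_nil_iff]; exact hpre
  obtain ⟨h, t, hht⟩ : ∃ h t, d = h :: t := by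
    cases hcd : d with
    | nil => exact absurd hcd hdne
    | cons a b => exact ⟨a, b, rfl⟩
  have hget0 : PySem.List.pyGet? d 0 = some h := by
    rw [hht]; simp [PySem.List.pyGet?, PySem.List.pyIdx?]
  rw [pyGet_neg_one d hdne, hget0]
  set lo := d.getLast hdne with hlo
  -- facts about the extremes
  have hmemd : ∀ y, y ∈ d ↔ y ∈ dellist := fun y => PySem.List.mem_sorted dellist _ true y
  have hmemds : ∀ y, y ∈ ds ↔ y ∈ dellist := fun y => PySem.List.mem_sorted dellist _ false y
  have hlo_le : ∀ y ∈ dellist, lo ≤ y := fun y hy =>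
    getLast_le_of_pairwise_ge d hdne (PySem.List.sorted_pairwise_rev dellist (fun x => x)) y ((hmemd y).2 hy)
  have hhi_ge : ∀ y ∈ dellist, y ≤ h := PySem.List.key_head_sorted_rev_ge dellist (fun x => x) hht
  have hperm : d.Perm ds := (PySem.List.sorted_perm dellist _ true).trans (PySem.List.sorted_perm dellist _ false).symm
  have hbis : ∀ q : Int, PySem.List.bisectLeft ds q = ds.countP (fun i => decide (i < q)) :=
    fun q => bisectLeft_eq_countP ds q (PySem.List.sorted_pairwise dellist (fun x => x))
  -- the two loop bodies agree pointwise
  have hfun : (fun (acc : List Int) (q : Int) =>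
        if d.contains q then acc
        else if q < lo then acc ++ [q]
        else if h < q then acc ++ [q - (d.length : Int)]
        else acc ++ [q - ((d.filter (fun i => decide (i < q))).length : Int)])
      = (fun (out : List Int) (q : Int) =>
        if (PySem.Set.ofList ds).contains q then out
        else out ++ [q - (PySem.List.bisectLeft ds q : Int)]) := by
    funext acc q
    have hcont : d.contains q = (PySem.Set.ofList ds).contains q := by
      have h1 : d.contains q = true ↔ q ∈ dellist := by
        rw [List.contains_iff_mem]; exact hmemd q
      have h2 : (PySem.Set.ofList ds).contains q = true ↔ q ∈ dellist := by
        rw [show (PySem.Set.ofList ds).contains q = (PySem.Set.ofList ds).contains (α := Int) q from rfl]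
        rw [PySem.Set.contains, List.contains_iff_mem, PySem.Set.mem_ofList]; exact hmemds q
      cases hb1 : d.contains q <;> cases hb2 : (PySem.Set.ofList ds).contains q <;> simp_all
    rw [← hcont]
    by_cases hq : q ∈ dellist
    · have hc : d.contains q = true := List.contains_iff_mem.2 ((hmemd q).2 hq)
      rw [hc]
      simp
    · have hc : d.contains q = false := by
        cases hb1 : d.contains q
        · rfl
        · exact absurd ((hmemd q).1 (List.contains_iff_mem.1 hb1)) hq
      rw [hc]
      simp only [Bool.false_eq_true, if_false]
      rw [hbis q]
      by_cases hql : q < lo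
      · have : ds.countP (fun i => decide (i < q)) = 0 := by
          rw [List.countP_eq_zero]
          intro a ha
          have : lo ≤ a := hlo_le a ((hmemds a).1 ha)
          simp; omega
        simp [hql, this]
      · by_cases hqh : h < q
        · have : ds.countP (fun i => decide (i < q)) = ds.length := by
            rw [List.countP_eq_length]
            intro a ha
            have : a ≤ h := hhi_ge a ((hmemds a).1 ha)
            simp; omega
          rw [if_neg hql, if_pos hqh, this, hperm.length_eq]
        · have : (d.filter (fun i => decide (i < q))).length = ds.countP (fun i => decide (i < q)) := by
            rw [← List.countP_eq_length_filter]
            exact hperm.countP_eq _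
          rw [if_neg hql, if_neg hqh, this]
  dsimp only
  rw [hfun]
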